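-- pv_equiv track=rewrite | github.com/data-divaa/python_begins | HackerRank/35_happiness.py | happiness_counter
-- ===== SOURCE A (Python) =====
-- def happiness_counter(a,b,nlist):
--     happiness = 0
--     '''
--     we run a loop through nlist if the element is in a we add 1
--     if not -1 else leave it
--     '''
--     for i in nlist:
--         if i in a:
--             happiness += 1
--         elif i in b:
--             happiness -= 1
--         else:
--             pass
--     return happiness
-- ===== SOURCE B (Python) =====
-- def happiness_counter(a, b, nlist):
--     cnt = {}
--     for v in nlist:
--         cnt[v] = cnt.get(v, 0) + 1
--     a_set = set(a)
--     b_only = set(b) - a_set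
--     return sum(cnt.get(v, 0) for v in a_set) - sum(cnt.get(v, 0) for v in b_only)
-- ===== Notes on version B (the rewrite author's own statement) =====
-- stated objective: faster
-- what changed: B builds a frequency dict of nlist once and sums tallies over set(a) and set(b)-set(a), replacing A's scan of nlist with list-membership tests in a and b.
import Mathlib
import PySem

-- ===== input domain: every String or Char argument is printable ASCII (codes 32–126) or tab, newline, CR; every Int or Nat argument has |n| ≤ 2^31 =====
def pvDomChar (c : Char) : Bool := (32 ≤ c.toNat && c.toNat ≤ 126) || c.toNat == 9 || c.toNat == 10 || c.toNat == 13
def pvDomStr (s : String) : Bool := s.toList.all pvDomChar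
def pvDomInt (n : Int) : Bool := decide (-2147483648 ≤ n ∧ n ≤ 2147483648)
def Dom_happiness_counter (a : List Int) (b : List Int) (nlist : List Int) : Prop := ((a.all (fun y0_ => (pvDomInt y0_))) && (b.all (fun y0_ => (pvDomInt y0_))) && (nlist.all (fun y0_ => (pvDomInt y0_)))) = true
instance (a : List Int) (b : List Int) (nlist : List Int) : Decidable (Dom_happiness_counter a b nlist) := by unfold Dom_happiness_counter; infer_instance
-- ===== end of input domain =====

-- B replaces A's scan of nlist with list-membership tests by one frequency
-- dict of nlist summed over set(a) and set(b)-set(a) (objective: faster).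

-- ===== PORT A =====
-- for i in nlist: if i in a: +1 elif i in b: -1 else: pass
def happiness_counter (a : List Int) (b : List Int) (nlist : List Int) : Int :=
  nlist.foldl (fun happiness i =>
    if i ∈ a then happiness + 1
    else if i ∈ b then happiness - 1
    else happiness) 0

-- ===== PORT B =====
def happiness_counter_alt (a : List Int) (b : List Int) (nlist : List Int) : Int :=
  let cnt : PySem.Dict Int Int :=
    nlist.foldl (fun d v => d.insert v (d.getD v 0 + 1)) PySem.Dict.empty
  let a_set : PySem.Set Int := PySem.Set.ofList a
  let b_only : PySem.Set Int := PySem.Set.diff (PySem.Set.ofList b) a_set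
  (a_set.map (fun v => cnt.getD v 0)).sum - (b_only.map (fun v => cnt.getD v 0)).sum

-- ===== PRECONDITION & SPEC =====
def Spec_happiness_counter (a : List Int) (b : List Int) (nlist : List Int) (out : Int) : Prop := out = happiness_counter_alt a b nlist
instance (a : List Int) (b : List Int) (nlist : List Int) (out : Int) : Decidable (Spec_happiness_counter a b nlist out) := by unfold Spec_happiness_counter; infer_instance

-- ===== CLAIM (what is proved, stated in full; the proofs are below) =====
def Claim_equal_happiness_counter : Prop := ∀ (a : List Int) (b : List Int) (nlist : List Int), Dom_happiness_counter a b nlist → Spec_happiness_counter a b nlist (happiness_counter a b nlist)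

-- ===== LEMMAS AND PROOFS =====

-- B's two sums, after the frequency dict is rewritten into List.count.
def pvCore (a b nlist : List Int) : Int :=
  ((PySem.Set.ofList a).map (fun v => (nlist.count v : Int))).sum
    - ((PySem.Set.diff (PySem.Set.ofList b) (PySem.Set.ofList a)).map
        (fun v => (nlist.count v : Int))).sum

lemma alt_eq_core (a b nlist : List Int) :
    happiness_counter_alt a b nlist = pvCore a b nlist := by
  simp only [happiness_counter_alt, pvCore, PySem.Dict.getD_foldl_insert_add_one,
    PySem.Dict.getD_empty, zero_add]

-- prepending i to nlist raises each count-sum by the multiplicity of i in s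
lemma sum_count_cons (s rest : List Int) (i : Int) :
    (s.map (fun v => ((i :: rest).count v : Int))).sum
      = (s.map (fun v => (rest.count v : Int))).sum + (s.count i : Int) := by
  have h : (s.map (fun v => ((i :: rest).count v : Int))).sum
      = (s.map (fun v => ((rest.count v : Int) + (if i == v then (1:Int) else 0)))).sum := by
    simp [List.count_cons]
  rw [h, PySem.List.sum_map_add_int, PySem.List.sum_map_ite_one_zero]
  congr 2
  simp only [List.count]
  refine List.countP_congr fun x _ => ?_
  by_cases hx : i = x
  · simp [hx]
  · simp [hx, Ne.symm hx]

lemma core_cons (a b : List Int) (i : Int) (rest : List Int) :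
    pvCore a b (i :: rest)
      = pvCore a b rest
        + (if i ∈ a then 1 else if i ∈ b then -1 else 0) := by
  have hnda := PySem.Set.nodup_ofList a
  have hndb := PySem.Set.nodup_diff (PySem.Set.ofList b) (PySem.Set.ofList a)
    (PySem.Set.nodup_ofList b)
  simp only [pvCore, sum_count_cons]
  by_cases ha : i ∈ a
  · have h1 : (PySem.Set.ofList a).count i = 1 :=
      List.count_eq_one_of_mem hnda ((PySem.Set.mem_ofList a i).mpr ha)
    have h2 : (PySem.Set.diff (PySem.Set.ofList b) (PySem.Set.ofList a)).count i = 0 :=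
      List.count_eq_zero_of_not_mem (by
        rw [PySem.Set.mem_diff]
        exact fun h => h.2 ((PySem.Set.mem_ofList a i).mpr ha))
    simp [ha, h2]; ring
  · have h1 : (PySem.Set.ofList a).count i = 0 :=
      List.count_eq_zero_of_not_mem (fun h => ha ((PySem.Set.mem_ofList a i).mp h))
    by_cases hb : i ∈ b
    · have h2 : (PySem.Set.diff (PySem.Set.ofList b) (PySem.Set.ofList a)).count i = 1 :=
        List.count_eq_one_of_mem hndb (by
          rw [PySem.Set.mem_diff]
          exact ⟨(PySem.Set.mem_ofList b i).mpr hb,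
            fun h => ha ((PySem.Set.mem_ofList a i).mp h)⟩)
      simp [ha, hb, h1, h2]; ring
    · have h2 : (PySem.Set.diff (PySem.Set.ofList b) (PySem.Set.ofList a)).count i = 0 :=
        List.count_eq_zero_of_not_mem (by
          rw [PySem.Set.mem_diff]
          exact fun h => hb ((PySem.Set.mem_ofList b i).mp h.1))
      simp [ha, hb, h1, h2]
lemma core_nil (a b : List Int) : pvCore a b [] = 0 := by
  simp [pvCore]

lemma foldl_eq_core (a b : List Int) (nlist : List Int) (c : Int) :
    nlist.foldl (fun happiness i =>
      if i ∈ a then happiness + 1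
      else if i ∈ b then happiness - 1
      else happiness) c = c + pvCore a b nlist := by
  induction nlist generalizing c with
  | nil => simp [core_nil]
  | cons i rest ih =>
      simp only [List.foldl_cons, ih, core_cons]
      by_cases ha : i ∈ a
      · simp [ha]; ring
      · by_cases hb : i ∈ b
        · simp [ha, hb]; ring
        · simp [ha, hb]

-- ===== VERDICT (by name: the statement is the Claim_ definition above) =====
theorem happiness_counter_spec : Claim_equal_happiness_counter := by
  intro a b nlist _
  show happiness_counter a b nlist = happiness_counter_alt a b nlist
  rw [alt_eq_core, happiness_counter, foldl_eq_core, zero_add]
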